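-- pv_equiv track=rewrite | github.com/nmcglohon/AoC-Collection | 2019/Day4/solve.py | check_valid2
-- ===== SOURCE A (Python) =====
-- def check_valid2(password):
--     strpass = str(password)
--
--     #check for non-decreasing:
--     if not all(x<=y for x, y in zip(strpass, strpass[1:])):
--         return False
--
--     one_pair = False
--     for char in strpass:
--         num_of_char = strpass.count(char)
--         if num_of_char == 2:
--             one_pair = True
--
--     return one_pair
-- ===== SOURCE B (Python) =====
-- def check_valid2(password):
--     s = str(password)
--     if any(a > b for a, b in zip(s, s[1:])):
--         return False
--     # single pass over maximal runs of equal characters (groupby-style)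
--     chars = list(s)
--     while chars:
--         c = chars[0]
--         rest = chars[1:]
--         k = 0
--         while k < len(rest) and rest[k] == c:
--             k += 1
--         if k + 1 == 2:
--             return True
--         chars = rest[k:]
--     return False
-- ===== Notes on version B (the rewrite author's own statement) =====
-- stated objective: idiomatic
-- what changed: Replaced the per-character full-string .count rescans with a single groupby-style scan over maximal runs of equal digits, returning True iff some run has length exactly 2 (valid because the string is already known non-decreasing).
import Mathlib
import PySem

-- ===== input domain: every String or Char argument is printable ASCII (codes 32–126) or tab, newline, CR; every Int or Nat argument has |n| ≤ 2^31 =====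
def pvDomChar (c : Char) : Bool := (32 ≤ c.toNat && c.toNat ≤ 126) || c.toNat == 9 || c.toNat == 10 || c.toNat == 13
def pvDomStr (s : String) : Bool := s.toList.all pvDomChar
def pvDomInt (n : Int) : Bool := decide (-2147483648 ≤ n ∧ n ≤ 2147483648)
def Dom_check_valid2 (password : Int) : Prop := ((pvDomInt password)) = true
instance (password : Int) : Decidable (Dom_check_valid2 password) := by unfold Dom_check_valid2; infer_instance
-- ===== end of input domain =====

-- B replaces A's per-character full-string count rescans with one groupby-style scan
-- over maximal runs of equal characters (idiomatic single pass).

-- ===== PORT A =====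
def check_valid2 (password : Int) : Bool :=
  let strpass := (PySem.Int.toStr password).toList
  -- 'not all(x<=y for x,y in zip(strpass, strpass[1:]))' → early False
  if !((strpass.zip (strpass.drop 1)).all (fun p => decide (p.1 ≤ p.2))) then
    false
  else
    -- str.count on a single character equals the char count of the list
    strpass.foldl (fun one_pair char =>
      if strpass.count char == 2 then true else one_pair) false

-- ===== PORT B =====
-- scan maximal runs: leading run of the head, then recurse on the remainder
def pvRunCheck : List Char → Bool
  | [] => false
  | c :: rest =>
    let k := (rest.takeWhile (· == c)).length
    if k + 1 == 2 then true
    else pvRunCheck (rest.dropWhile (· == c))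
termination_by l => l.length
decreasing_by
  simp only [List.length_cons]
  exact Nat.lt_succ_of_le (List.Sublist.length_le (List.dropWhile_sublist _))

def check_valid2_alt (password : Int) : Bool :=
  let s := (PySem.Int.toStr password).toList
  if (s.zip (s.drop 1)).any (fun p => decide (p.2 < p.1)) then
    false
  else
    pvRunCheck s

-- ===== PRECONDITION & SPEC =====
def Spec_check_valid2 (password : Int) (out : Bool) : Prop := out = check_valid2_alt password
instance (password : Int) (out : Bool) : Decidable (Spec_check_valid2 password out) := by unfold Spec_check_valid2; infer_instance

-- ===== CLAIM (what is proved, stated in full; the proofs are below) =====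
def Claim_equal_check_valid2 : Prop := ∀ (password : Int), Dom_check_valid2 password → Spec_check_valid2 password (check_valid2 password)

-- ===== LEMMAS AND PROOFS =====

-- A's flag-setting fold is an 'any'
theorem pv_foldl_flag (p : Char → Bool) : ∀ (l : List Char) (b : Bool),
    l.foldl (fun acc c => if p c then true else acc) b = (b || l.any p) := by
  intro l
  induction l with
  | nil => simp
  | cons x xs ih =>
    intro b
    simp only [List.foldl_cons, List.any_cons, ih]
    by_cases h : p x = true <;> cases b <;> simp [h]

-- the zip-with-tail guard is IsChain (· ≤ ·)
theorem pv_guard_chain : ∀ (s : List Char),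
    ((s.zip (s.drop 1)).all (fun p => decide (p.1 ≤ p.2)) = true) ↔ s.IsChain (· ≤ ·) := by
  intro s
  induction s with
  | nil => simp
  | cons a t ih =>
    cases t with
    | nil => simp
    | cons b u =>
      rw [List.isChain_cons_cons]
      simp only [List.drop_one, List.tail_cons, List.zip_cons_cons, List.all_cons,
        Bool.and_eq_true, decide_eq_true_eq] at *
      constructor
      · rintro ⟨h1, h2⟩
        exact ⟨h1, ih.mp (by simpa using h2)⟩
      · rintro ⟨h1, h2⟩
        exact ⟨h1, by simpa using ih.mpr h2⟩

-- B's guard is the negation of A's guard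
theorem pv_guard_neg (s : List Char) :
    (s.zip (s.drop 1)).any (fun p => decide (p.2 < p.1))
      = !((s.zip (s.drop 1)).all (fun p => decide (p.1 ≤ p.2))) := by
  induction (s.zip (s.drop 1)) with
  | nil => simp
  | cons x xs ih =>
    simp only [List.any_cons, List.all_cons, ih, Bool.not_and]
    congr 1
    by_cases h : x.1 ≤ x.2 <;> simp [h, lt_iff_not_ge]

-- on a pairwise-sorted list, "some char occurs exactly twice" = "some maximal run has length 2"
theorem pv_main : ∀ (n : Nat) (s : List Char), s.length ≤ n → s.Pairwise (· ≤ ·) →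
    s.any (fun c => s.count c == 2) = pvRunCheck s := by
  intro n
  induction n with
  | zero =>
    intro s hs _
    have : s = [] := List.eq_nil_of_length_eq_zero (Nat.le_zero.mp hs)
    subst this; simp [pvRunCheck]
  | succ n ih =>
    intro s hlen hsort
    cases s with
    | nil => simp [pvRunCheck]
    | cons c rest =>
      have hrest : rest = rest.takeWhile (· == c) ++ rest.dropWhile (· == c) :=
        (List.takeWhile_append_dropWhile).symm
      set t := rest.takeWhile (· == c) with ht
      set d := rest.dropWhile (· == c) with hd
      -- every element of t equals c
      have htc : ∀ x ∈ t, x = c := by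
        intro x hx
        have := List.mem_takeWhile_imp hx
        simpa using this
      have hdsort : d.Pairwise (· ≤ ·) :=
        List.Pairwise.sublist (List.dropWhile_sublist _) ((List.pairwise_cons.mp hsort).2)
      -- every element of d is > c
      have hdgt : ∀ x ∈ d, c < x := by
        cases hD : d with
        | nil => intro x hx; simp at hx
        | cons h0 d' =>
          have hhead : ¬ (h0 == c) = true := by
            have := List.head?_dropWhile_not (p := (· == c)) (l := rest)
            rw [← hd, hD] at this
            simpa using this
          have hle : ∀ x ∈ rest, c ≤ x := by
            intro x hx
            exact (List.pairwise_cons.mp hsort).1 x hx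
          have hmemrest : ∀ x ∈ d, x ∈ rest := by
            intro x hx
            exact (List.dropWhile_sublist _).mem hx
          intro x hx
          rcases List.mem_cons.mp hx with rfl | hx'
          · exact lt_of_le_of_ne (hle x (hmemrest x (by rw [hD]; exact List.mem_cons_self)))
              (by intro h; exact hhead (by simp [h.symm]))
          · have h0gt : c < h0 := lt_of_le_of_ne
              (hle h0 (hmemrest h0 (by rw [hD]; exact List.mem_cons_self)))
              (by intro h; exact hhead (by simp [h.symm]))
            have hds := hdsort
            rw [hD] at hds
            have : h0 ≤ x := (List.pairwise_cons.mp hds).1 x hx'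
            exact lt_of_lt_of_le h0gt this
      have hcnotd : c ∉ d := fun h => lt_irrefl c (hdgt c h)
      have hcountt : t.count c = t.length := by
        apply List.count_eq_length.mpr
        intro x hx; exact ((htc x hx).symm : c = x) ▸ rfl
      -- count of c in the whole list
      have hcountc : (c :: rest).count c = t.length + 1 := by
        rw [hrest]
        simp [List.count_append, hcountt, List.count_eq_zero.mpr hcnotd]
      -- count of x ∈ d in the whole list is its count in d
      have hcountd : ∀ x ∈ d, (c :: rest).count x = d.count x := by
        intro x hx
        have hxc : x ≠ c := ne_of_gt (hdgt x hx)
        have hxt : x ∉ t := fun h => hxc (htc x h)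
        rw [hrest]
        simp [List.count_append, Ne.symm hxc, List.count_eq_zero.mpr hxt]
      have hdlen : d.length ≤ n := by
        have h1 : d.length ≤ rest.length := (List.dropWhile_sublist _).length_le
        have h2 : rest.length + 1 ≤ n + 1 := by simpa using hlen
        omega
      have hih := ih d hdlen hdsort
      -- unfold pvRunCheck once
      rw [pvRunCheck]
      simp only [← ht, ← hd]
      -- split the any over c :: t ++ d
      have hany : (c :: rest).any (fun x => (c :: rest).count x == 2)
          = (((c :: rest).count c == 2) || d.any (fun x => d.count x == 2)) := by
        rw [Bool.eq_iff_iff]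
        simp only [List.any_eq_true, beq_iff_eq, Bool.or_eq_true]
        constructor
        · rintro ⟨x, hx, hcx⟩
          rcases List.mem_cons.mp hx with rfl | hx'
          · exact Or.inl hcx
          · rw [hrest] at hx'
            rcases List.mem_append.mp hx' with hxt | hxd
            · exact Or.inl ((htc x hxt) ▸ hcx)
            · exact Or.inr ⟨x, hxd, (hcountd x hxd) ▸ hcx⟩
        · rintro (h | ⟨x, hx, hcx⟩)
          · exact ⟨c, List.mem_cons_self, h⟩
          · exact ⟨x, List.mem_cons.mpr (Or.inr (by rw [hrest]; exact List.mem_append_right _ hx)),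
              (hcountd x hx).symm ▸ hcx⟩
      rw [hany, hcountc, hih]
      by_cases hb : (t.length + 1 == 2) = true
      · simp [hb]
      · simp [hb]

-- both ports, stated over the shared character list
theorem pv_core (s : List Char) :
    (if !((s.zip (s.drop 1)).all (fun p => decide (p.1 ≤ p.2))) then
      false
    else
      s.foldl (fun one_pair char =>
        if s.count char == 2 then true else one_pair) false)
    = (if (s.zip (s.drop 1)).any (fun p => decide (p.2 < p.1)) then
        false
      else
        pvRunCheck s) := by
  rw [pv_guard_neg]
  cases hg : ((s.zip (s.drop 1)).all (fun p => decide (p.1 ≤ p.2))) with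
  | false => simp
  | true =>
    simp only [Bool.not_true, Bool.false_eq_true, if_false]
    have hpair : s.Pairwise (· ≤ ·) := List.isChain_iff_pairwise.mp ((pv_guard_chain s).mp hg)
    rw [pv_foldl_flag]
    simp only [Bool.false_or]
    exact pv_main s.length s le_rfl hpair

-- ===== VERDICT (by name: the statement is the Claim_ definition above) =====
theorem check_valid2_spec : Claim_equal_check_valid2 := by
  intro password _
  exact pv_core ((PySem.Int.toStr password).toList)
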